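-- pv_equiv track=rewrite | github.com/intelc/flashmlx | autobench/loop.py | get_target_module
-- ===== SOURCE A (Python) =====
-- CYCLE_MODULES = [
--     ("attention", 20),
--     ("kv_cache", 20),
--     ("quantize", 20),
--     ("generate", 20),
--     ("cross-module", 20),
-- ]
--
-- def get_target_module(experiment_num: int) -> str:
--     """Determine which module to optimize based on experiment number."""
--     cycle_len = sum(count for _, count in CYCLE_MODULES)
--     pos = experiment_num % cycle_len
--     cumulative = 0
--     for module, count in CYCLE_MODULES:
--         cumulative += count
--         if pos < cumulative:
--             return module
--     return "cross-module"
-- ===== SOURCE B (Python) =====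
-- import bisect
-- from itertools import accumulate
--
-- CYCLE_MODULES = [
--     ("attention", 20),
--     ("kv_cache", 20),
--     ("quantize", 20),
--     ("generate", 20),
--     ("cross-module", 20),
-- ]
--
-- _BOUNDARIES = list(accumulate(count for _, count in CYCLE_MODULES))
--
-- def get_target_module(experiment_num: int) -> str:
--     """Determine which module to optimize based on experiment number."""
--     pos = experiment_num % _BOUNDARIES[-1]
--     idx = bisect.bisect_right(_BOUNDARIES, pos)
--     if idx == len(_BOUNDARIES):
--         return "cross-module"
--     return CYCLE_MODULES[idx][0]
-- ===== Notes on version B (the rewrite author's own statement) =====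
-- stated objective: idiomatic
-- what changed: Replaces the running-cumulative linear scan with a precomputed prefix-sum boundary table queried by bisect_right (binary search), indexing directly into CYCLE_MODULES.
import Mathlib
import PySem

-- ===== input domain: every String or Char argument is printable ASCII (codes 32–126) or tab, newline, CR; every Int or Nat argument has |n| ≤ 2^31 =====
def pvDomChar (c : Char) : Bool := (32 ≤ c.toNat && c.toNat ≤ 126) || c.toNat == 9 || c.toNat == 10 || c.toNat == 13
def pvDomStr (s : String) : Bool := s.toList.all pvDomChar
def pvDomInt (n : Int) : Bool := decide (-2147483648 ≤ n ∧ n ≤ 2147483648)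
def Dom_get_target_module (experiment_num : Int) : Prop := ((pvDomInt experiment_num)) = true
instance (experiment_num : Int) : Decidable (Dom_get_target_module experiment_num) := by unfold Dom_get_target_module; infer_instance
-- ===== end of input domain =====

-- B replaces A's running-cumulative linear scan by a prefix-sum boundary table queried
-- with a bisect_right binary search (objective: idiomatic).

-- ===== PORT A =====
-- CYCLE_MODULES
def pvCycleModules : List (String × Int) :=
  [("attention", 20), ("kv_cache", 20), ("quantize", 20), ("generate", 20), ("cross-module", 20)]

-- the for-loop with early return: recursion over the list, carrying `cumulative`
def pvLoopA (pos : Int) : List (String × Int) → Int → String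
  | [], _ => "cross-module"
  | (module, count) :: rest, cumulative =>
      let cumulative := cumulative + count
      if pos < cumulative then module else pvLoopA pos rest cumulative

def get_target_module (experiment_num : Int) : String :=
  let cycle_len := (pvCycleModules.map (fun p => p.2)).sum
  let pos := PySem.Int.mod experiment_num cycle_len
  pvLoopA pos pvCycleModules 0

-- ===== PORT B =====
-- itertools.accumulate of the counts
def pvBoundaries : List Int :=
  (pvCycleModules.foldl (fun (acc : List Int × Int) p =>
    let s := acc.2 + p.2; (acc.1 ++ [s], s)) ([], 0)).1

-- bisect.bisect_right(a, x): binary search, returns insertion point after equal elements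
-- structural fuel (= hi - lo at the top call) only makes the 'while lo < hi' loop total
def pvBisectGo (fuel : Nat) (a : List Int) (x : Int) (lo hi : Nat) : Nat :=
  match fuel with
  | 0 => lo
  | fuel + 1 =>
    if lo < hi then
      let mid := (lo + hi) / 2
      if x < (a.getD mid 0) then pvBisectGo fuel a x lo mid
      else pvBisectGo fuel a x (mid + 1) hi
    else lo

def pvBisectRight (a : List Int) (x : Int) (lo hi : Nat) : Nat :=
  pvBisectGo (hi - lo) a x lo hi

def get_target_module_alt (experiment_num : Int) : String :=
  let pos := PySem.Int.mod experiment_num (pvBoundaries.getLastD 0)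
  let idx := pvBisectRight pvBoundaries pos 0 pvBoundaries.length
  if idx = pvBoundaries.length then "cross-module"
  else (pvCycleModules.getD idx ("", 0)).1

-- ===== PRECONDITION & SPEC =====
def Spec_get_target_module (experiment_num : Int) (out : String) : Prop := out = get_target_module_alt experiment_num
instance (experiment_num : Int) (out : String) : Decidable (Spec_get_target_module experiment_num out) := by unfold Spec_get_target_module; infer_instance

-- ===== CLAIM (what is proved, stated in full; the proofs are below) =====
def Claim_equal_get_target_module : Prop := ∀ (experiment_num : Int), Dom_get_target_module experiment_num → Spec_get_target_module experiment_num (get_target_module experiment_num)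

-- ===== LEMMAS AND PROOFS =====
-- both sides depend only on pos = experiment_num % 100, which lies in [0, 100)
lemma pv_pos_eq (p : Int) (h0 : 0 ≤ p) (h1 : p < 100) :
    pvLoopA p pvCycleModules 0 =
      (if pvBisectRight pvBoundaries p 0 pvBoundaries.length = pvBoundaries.length
       then "cross-module"
       else (pvCycleModules.getD (pvBisectRight pvBoundaries p 0 pvBoundaries.length) ("", 0)).1) := by
  interval_cases p <;> decide

-- ===== VERDICT (by name: the statement is the Claim_ definition above) =====
theorem get_target_module_spec : Claim_equal_get_target_module := by
  intro n _
  unfold Spec_get_target_module get_target_module get_target_module_alt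
  have hB : pvBoundaries = [20, 40, 60, 80, 100] := by decide
  have hlen : (pvCycleModules.map (fun p => p.2)).sum = 100 := by decide
  simp only [hB, hlen]
  have h0 : 0 ≤ PySem.Int.mod n 100 := PySem.Int.mod_nonneg n (by norm_num)
  have h1 : PySem.Int.mod n 100 < 100 := PySem.Int.mod_lt n (by norm_num)
  have := pv_pos_eq (PySem.Int.mod n 100) h0 h1
  simpa [hB] using this
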